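-- pv_equiv track=rewrite | github.com/Loss-of-time/Python-Study | [03]phone_number.py | mfUp
-- ===== SOURCE A (Python) =====
-- def mfUp(results):
--     # 只保留磁场上升的电话号
--     down = []
--     add = 0
--     for result in results:
--         wantBreak = False
--         for bitLi in result[1:]:
--             if wantBreak:
--                 break
--             mfLevel = []
--             for bit in bitLi:
--                 if len(bit) > 1:
--                     bit = list(bit)
--                     mfLevel.append(bit[-1])
--             for bit in range(len(mfLevel)-1):
--                 if mfLevel[bit] > mfLevel[bit+1]:
--                     down.append(add)
--                     wantBreak = True
--                     break
--         add += 1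
--     deleted = 0
--     for i in down:
--         del results[i-deleted]
--         deleted += 1
--     return results
-- ===== SOURCE B (Python) =====
-- def mfUp(results):
--     # 只保留磁场上升的电话号
--     def keep(result):
--         for bitLi in result[1:]:
--             levels = [bit[-1] for bit in bitLi if len(bit) > 1]
--             if any(levels[k] > levels[k + 1] for k in range(len(levels) - 1)):
--                 return False
--         return True
--     results[:] = [r for r in results if keep(r)]
--     return results
-- ===== Notes on version B (the rewrite author's own statement) =====
-- stated objective: simpler
-- what changed: Replaces the two-phase index-collection plus offset-corrected deletion with a keep-predicate and a single in-place filtering rebuild via slice assignment.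
import Mathlib
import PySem

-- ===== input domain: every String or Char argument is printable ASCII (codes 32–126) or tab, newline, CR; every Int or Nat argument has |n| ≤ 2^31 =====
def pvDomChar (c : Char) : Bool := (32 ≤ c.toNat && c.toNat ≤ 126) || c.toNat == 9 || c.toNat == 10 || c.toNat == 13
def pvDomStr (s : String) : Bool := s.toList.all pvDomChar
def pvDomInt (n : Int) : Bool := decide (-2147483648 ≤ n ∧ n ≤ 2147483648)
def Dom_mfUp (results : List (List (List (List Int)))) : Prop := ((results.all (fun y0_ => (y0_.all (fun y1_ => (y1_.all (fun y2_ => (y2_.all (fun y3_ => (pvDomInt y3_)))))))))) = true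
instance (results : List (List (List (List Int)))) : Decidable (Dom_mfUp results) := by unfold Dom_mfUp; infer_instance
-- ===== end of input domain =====

-- B keeps the in-place mutation (slice assignment) of A; the theorem below is about the return value,
-- which is the same object/same list in both. B replaces A's collect-indices-then-offset-delete passes
-- with a keep predicate and one filtering pass.

-- ===== PORT A =====
-- the inner `for bit in range(len(mfLevel)-1)` loop with its break
def pvADecr : List Int → Bool
  | a :: b :: rest => if a > b then true else pvADecr (b :: rest)
  | _ => false

-- one record's scan over result[1:] carrying (down, wantBreak); add is the record's index
def pvARecord (add : Nat) (result : List (List (List Int))) (down : List Nat) : List Nat × Bool :=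
  (result.drop 1).foldl
    (fun (st : List Nat × Bool) bitLi =>
      if st.2 then st
      else
        let mfLevel := bitLi.foldl
          (fun acc bit => if bit.length > 1 then acc ++ [bit.getLastD 0] else acc) []
        if pvADecr mfLevel then (st.1 ++ [add], true) else (st.1, false))
    (down, false)

def mfUp (results : List (List (List (List Int)))) : List (List (List (List Int))) :=
  let down := (results.foldl
    (fun (st : List Nat × Nat) result => ((pvARecord st.2 result st.1).1, st.2 + 1))
    ([], 0)).1
  (down.foldl
    (fun (st : List (List (List (List Int))) × Nat) i =>
      (st.1.eraseIdx (i - st.2), st.2 + 1))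
    (results, 0)).1

-- ===== PORT B =====
def pvNonDecr : List Int → Bool
  | a :: b :: rest => (a ≤ b) && pvNonDecr (b :: rest)
  | _ => true

def pvKeep (result : List (List (List Int))) : Bool :=
  (result.drop 1).all (fun bitLi =>
    pvNonDecr (bitLi.filterMap (fun bit =>
      if bit.length > 1 then some (bit.getLastD 0) else none)))

def mfUp_alt (results : List (List (List (List Int)))) : List (List (List (List Int))) :=
  results.filter pvKeep

-- ===== PRECONDITION & SPEC =====
def Spec_mfUp (results : List (List (List (List Int)))) (out : List (List (List (List Int)))) : Prop := out = mfUp_alt results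
instance (results : List (List (List (List Int)))) (out : List (List (List (List Int)))) : Decidable (Spec_mfUp results out) := by unfold Spec_mfUp; infer_instance

-- ===== CLAIM (what is proved, stated in full; the proofs are below) =====
def Claim_equal_mfUp : Prop := ∀ (results : List (List (List (List Int)))), Dom_mfUp results → Spec_mfUp results (mfUp results)

-- ===== LEMMAS AND PROOFS =====

-- A's decrease scan is the negation of B's non-decrease scan
theorem pvADecr_eq (l : List Int) : pvADecr l = !pvNonDecr l := by
  induction l with
  | nil => rfl
  | cons a t ih =>
    cases t with
    | nil => rfl
    | cons b r =>
      simp only [pvADecr, pvNonDecr]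
      by_cases h : a > b
      · simp [h, not_le.mpr h]
      · simp [h, not_lt.mp h, ih]

-- A's mfLevel fold builds the filterMap of last elements
theorem pvMfLevel_eq (bitLi : List (List Int)) (acc : List Int) :
    bitLi.foldl (fun acc bit => if bit.length > 1 then acc ++ [bit.getLastD 0] else acc) acc
      = acc ++ bitLi.filterMap (fun bit => if bit.length > 1 then some (bit.getLastD 0) else none) := by
  induction bitLi generalizing acc with
  | nil => simp
  | cons b t ih =>
    simp only [List.foldl_cons, List.filterMap_cons]
    by_cases h : b.length > 1
    · rw [if_pos h, if_pos h, ih]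
      simp
    · rw [if_neg h, if_neg h, ih]

-- once wantBreak is set, the record fold is absorbing
theorem pvARecord_absorb (add : Nat) (L : List (List (List Int))) (d : List Nat) :
    L.foldl (fun (st : List Nat × Bool) bitLi =>
      if st.2 then st
      else
        let mfLevel := bitLi.foldl
          (fun acc bit => if bit.length > 1 then acc ++ [bit.getLastD 0] else acc) []
        if pvADecr mfLevel then (st.1 ++ [add], true) else (st.1, false))
      (d, true) = (d, true) := by
  induction L with
  | nil => rfl
  | cons x t ih => simpa using ih

-- per-record characterisation: A appends `add` exactly when B's keep predicate fails
theorem pvARecord_eq (add : Nat) (result : List (List (List Int))) (down : List Nat) :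
    pvARecord add result down = (down ++ (if pvKeep result then [] else [add]), !pvKeep result) := by
  unfold pvARecord pvKeep
  generalize result.drop 1 = L
  induction L generalizing down with
  | nil => simp
  | cons bitLi t ih =>
    rw [List.foldl_cons]
    have hml := pvMfLevel_eq bitLi []
    by_cases hd : pvNonDecr (bitLi.filterMap (fun bit => if bit.length > 1 then some (bit.getLastD 0) else none)) = true
    · have hA : pvADecr (bitLi.foldl (fun acc bit => if bit.length > 1 then acc ++ [bit.getLastD 0] else acc) []) = false := by
        rw [hml, List.nil_append, pvADecr_eq, hd]; rfl
      show List.foldl _ (if pvADecr (bitLi.foldl (fun acc bit => if bit.length > 1 then acc ++ [bit.getLastD 0] else acc) []) = true then ((down ++ [add] : List Nat), true) else ((down : List Nat), false)) t = _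
      rw [hA, if_neg (by decide), ih]
      simp only [List.all_cons, hd, Bool.true_and]
    · have hd' : pvNonDecr (bitLi.filterMap (fun bit => if bit.length > 1 then some (bit.getLastD 0) else none)) = false := by
        simpa using hd
      have hA : pvADecr (bitLi.foldl (fun acc bit => if bit.length > 1 then acc ++ [bit.getLastD 0] else acc) []) = true := by
        rw [hml, List.nil_append, pvADecr_eq, hd']; rfl
      show List.foldl _ (if pvADecr (bitLi.foldl (fun acc bit => if bit.length > 1 then acc ++ [bit.getLastD 0] else acc) []) = true then ((down ++ [add] : List Nat), true) else ((down : List Nat), false)) t = _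
      rw [hA, if_pos rfl, pvARecord_absorb]
      simp only [List.all_cons, hd', Bool.false_and, Bool.not_false, Bool.false_eq_true, if_false]

-- indices (from a0) of the records B drops
def pvBadIdx (a0 : Nat) : List (List (List (List Int))) → List Nat
  | [] => []
  | r :: rs => (if pvKeep r then [] else [a0]) ++ pvBadIdx (a0 + 1) rs

-- the outer collection fold produces exactly those indices
theorem pvCollect_eq (rs : List (List (List (List Int)))) (d : List Nat) (a0 : Nat) :
    rs.foldl (fun (st : List Nat × Nat) result => ((pvARecord st.2 result st.1).1, st.2 + 1)) (d, a0)
      = (d ++ pvBadIdx a0 rs, a0 + rs.length) := by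
  induction rs generalizing d a0 with
  | nil => simp [pvBadIdx]
  | cons r t ih =>
    rw [List.foldl_cons]
    show List.foldl _ ((pvARecord a0 r d).1, a0 + 1) t = _
    rw [pvARecord_eq]
    rw [show ((((d ++ if pvKeep r then [] else [a0]), !pvKeep r) : List Nat × Bool).1, a0 + 1)
        = (((d ++ if pvKeep r then [] else [a0]) : List Nat), a0 + 1) from rfl]
    rw [ih]
    simp only [pvBadIdx, Prod.mk.injEq, List.append_assoc, List.length_cons]
    exact ⟨trivial, by omega⟩

-- deleting at the collected indices (offset-corrected) filters the list
theorem pvDelete_eq (rs : List (List (List (List Int)))) (pre : List (List (List (List Int)))) (deleted : Nat) :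
    (pvBadIdx (pre.length + deleted) rs).foldl
      (fun (st : List (List (List (List Int))) × Nat) i => (st.1.eraseIdx (i - st.2), st.2 + 1))
      (pre ++ rs, deleted)
      = (pre ++ rs.filter pvKeep, deleted + rs.countP (fun r => !pvKeep r)) := by
  induction rs generalizing pre deleted with
  | nil => simp [pvBadIdx]
  | cons r t ih =>
    by_cases h : pvKeep r = true
    · rw [show pvBadIdx (pre.length + deleted) (r :: t)
          = pvBadIdx (pre.length + deleted + 1) t by simp [pvBadIdx, h]]
      rw [show pre ++ r :: t = (pre ++ [r]) ++ t by simp,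
          show pre.length + deleted + 1 = (pre ++ [r]).length + deleted by simp; omega,
          ih]
      simp [h]
    · simp only [Bool.not_eq_true] at h
      rw [show pvBadIdx (pre.length + deleted) (r :: t)
          = (pre.length + deleted) :: pvBadIdx (pre.length + deleted + 1) t by simp [pvBadIdx, h]]
      rw [List.foldl_cons]
      rw [show ((((pre ++ r :: t).eraseIdx (pre.length + deleted - deleted)) : List _), deleted + 1)
          = ((pre ++ t : List _), deleted + 1) by
            rw [show pre.length + deleted - deleted = pre.length by omega,
                List.eraseIdx_append_of_length_le (Nat.le_refl pre.length)]
            simp]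
      rw [show pre.length + deleted + 1 = pre.length + (deleted + 1) by omega, ih]
      simp [h]
      omega

-- ===== VERDICT (by name: the statement is the Claim_ definition above) =====
theorem mfUp_spec : Claim_equal_mfUp := by
  intro results _
  show mfUp results = mfUp_alt results
  have h := pvDelete_eq results [] 0
  simp only [List.length_nil, Nat.zero_add, List.nil_append] at h
  simp only [mfUp, mfUp_alt, pvCollect_eq, List.nil_append]
  rw [h]
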